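-- pv_equiv track=rewrite | github.com/song2mr/GTM_Agent | agent/nodes/journey_planner.py | _normalize_and_sort_exploration_queue
-- ===== SOURCE A (Python) =====
-- EXCLUDE_FROM_EXPLORATION_QUEUE = frozenset({"purchase", "refund"})
--
-- _EXCLUDE_QUEUE_REASONS: dict[str, str] = {
--     "purchase": "결제 완료·실결제 플로우; GTM 설계/Manual에서만 다룸",
--     "refund": "환불/취소는 서버·백오피스 플로우 중심; GTM 설계/Manual에서만 다룸",
-- }
--
-- _EXPLORATION_RANK: dict[str, int] = {
--     "page_view": 0,
--     "view_promotion": 5,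
--     "view_item_list": 10,
--     "select_item": 20,
--     "view_item": 30,
--     "add_to_wishlist": 35,
--     "add_to_cart": 40,
--     "view_cart": 50,
--     "remove_from_cart": 55,
--     "begin_checkout": 60,
--     "add_shipping_info": 70,
--     "add_payment_info": 80,
-- }
--
-- def _normalize_and_sort_exploration_queue(queue: list[str]) -> tuple[list[str], list[str]]:
--     """중복 제거·표준 순서 정렬·purchase/refund 등 탐색 제외.
--
--     Returns:
--         (정렬된 큐, 사람이 읽을 로그 메시지 목록)
--     """
--     notes: list[str] = []
--     raw = [(str(e) or "").strip() for e in queue if e and str(e).strip()]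
--     filtered: list[str] = []
--     for name in raw:
--         if name in EXCLUDE_FROM_EXPLORATION_QUEUE:
--             detail = _EXCLUDE_QUEUE_REASONS.get(name, "GTM 설계/Manual에서만 다룸")
--             notes.append(f"{name}: 자동 브라우저 탐색 큐에서 제외 ({detail})")
--             continue
--         filtered.append(name)
--
--     dedup: list[str] = []
--     seen: set[str] = set()
--     for name in filtered:
--         if name not in seen:
--             seen.add(name)
--             dedup.append(name)
--
--     decorated = [(name, i) for i, name in enumerate(dedup)]
--     decorated.sort(
--         key=lambda pair: (_EXPLORATION_RANK.get(pair[0], 1000), pair[1]),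
--     )
--     return [pair[0] for pair in decorated], notes
-- ===== SOURCE B (Python) =====
-- EXCLUDE_FROM_EXPLORATION_QUEUE = frozenset({"purchase", "refund"})
--
-- _EXCLUDE_QUEUE_REASONS: dict[str, str] = {
--     "purchase": "결제 완료·실결제 플로우; GTM 설계/Manual에서만 다룸",
--     "refund": "환불/취소는 서버·백오피스 플로우 중심; GTM 설계/Manual에서만 다룸",
-- }
--
-- _EXPLORATION_RANK: dict[str, int] = {
--     "page_view": 0,
--     "view_promotion": 5,
--     "view_item_list": 10,
--     "select_item": 20,
--     "view_item": 30,
--     "add_to_wishlist": 35,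
--     "add_to_cart": 40,
--     "view_cart": 50,
--     "remove_from_cart": 55,
--     "begin_checkout": 60,
--     "add_shipping_info": 70,
--     "add_payment_info": 80,
-- }
--
--
-- def _normalize_and_sort_exploration_queue(queue: list[str]) -> tuple[list[str], list[str]]:
--     """Single pass (strip + exclude + dedup), then rank-bucket instead of a comparison sort."""
--     notes: list[str] = []
--     dedup: list[str] = []
--     seen: set[str] = set()
--     for e in queue:
--         name = str(e).strip()
--         if not name:
--             continue
--         if name in EXCLUDE_FROM_EXPLORATION_QUEUE:
--             detail = _EXCLUDE_QUEUE_REASONS.get(name, "GTM 설계/Manual에서만 다룸")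
--             notes.append(f"{name}: 자동 브라우저 탐색 큐에서 제외 ({detail})")
--             continue
--         if name not in seen:
--             seen.add(name)
--             dedup.append(name)
--     order = sorted(_EXPLORATION_RANK, key=_EXPLORATION_RANK.get)
--     ranked = [n for n in order if n in seen]
--     unranked = [n for n in dedup if n not in _EXPLORATION_RANK]
--     return ranked + unranked, notes
-- ===== Notes on version B (the rewrite author's own statement) =====
-- stated objective: alternative
-- what changed: A does three passes (strip-filter, exclude+notes, dedup) and then a decorate-sort-undecorate by (rank, index); B fuses strip/exclude/dedup into one pass and replaces the comparison sort by rank-bucketing: walk the rank table's keys in ascending-rank order appending those present, then append unknown-rank names in first-seen order.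
import Mathlib
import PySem

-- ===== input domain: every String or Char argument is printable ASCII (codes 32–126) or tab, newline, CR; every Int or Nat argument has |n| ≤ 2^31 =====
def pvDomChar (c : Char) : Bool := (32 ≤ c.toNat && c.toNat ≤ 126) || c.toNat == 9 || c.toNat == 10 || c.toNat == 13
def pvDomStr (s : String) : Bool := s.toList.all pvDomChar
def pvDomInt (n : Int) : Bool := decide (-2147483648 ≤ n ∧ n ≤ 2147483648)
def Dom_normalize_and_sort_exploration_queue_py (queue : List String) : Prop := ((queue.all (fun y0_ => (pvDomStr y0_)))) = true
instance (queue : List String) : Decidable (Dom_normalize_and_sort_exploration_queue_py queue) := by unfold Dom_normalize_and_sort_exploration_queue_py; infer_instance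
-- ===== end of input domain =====

-- B fuses A's three passes (strip-filter, exclude+notes, dedup) into one pass and replaces the
-- decorate-sort-undecorate by rank-bucketing over the fixed rank table; same return value everywhere.

-- ===== PORT A =====
-- shared module constants (EXCLUDE_FROM_EXPLORATION_QUEUE, _EXCLUDE_QUEUE_REASONS, _EXPLORATION_RANK)
def pvExclude : List String := ["purchase", "refund"]

def pvReasons : PySem.Dict String String :=
  PySem.Dict.ofList
    [("purchase", "결제 완료·실결제 플로우; GTM 설계/Manual에서만 다룸"),
     ("refund", "환불/취소는 서버·백오피스 플로우 중심; GTM 설계/Manual에서만 다룸")]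

def pvRank : PySem.Dict String Int :=
  PySem.Dict.ofList
    [("page_view", 0), ("view_promotion", 5), ("view_item_list", 10), ("select_item", 20),
     ("view_item", 30), ("add_to_wishlist", 35), ("add_to_cart", 40), ("view_cart", 50),
     ("remove_from_cart", 55), ("begin_checkout", 60), ("add_shipping_info", 70),
     ("add_payment_info", 80)]

-- the f-string note (detail = _EXCLUDE_QUEUE_REASONS.get(name, default))
def pvNote (name : String) : String :=
  name ++ ": 자동 브라우저 탐색 큐에서 제외 (" ++ PySem.Dict.getD pvReasons name "GTM 설계/Manual에서만 다룸" ++ ")"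

-- raw = [(str(e) or "").strip() for e in queue if e and str(e).strip()]
def pvRawOf (queue : List String) : List String :=
  (queue.filter (fun e => !(e == "") && !(PySem.Str.strip e == ""))).map (fun e => PySem.Str.strip e)

-- body of A's exclude/notes loop, state (notes, filtered)
def pvStepFilter (st : List String × List String) (name : String) : List String × List String :=
  if pvExclude.contains name then (st.1 ++ [pvNote name], st.2) else (st.1, st.2 ++ [name])

-- body of A's dedup loop, state (seen, dedup)
def pvStepDedup (st : PySem.Set String × List String) (name : String) : PySem.Set String × List String :=
  if !(PySem.Set.contains st.1 name) then (PySem.Set.add st.1 name, st.2 ++ [name]) else st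

def normalize_and_sort_exploration_queue_py (queue : List String) : List String × List String :=
  let raw := pvRawOf queue
  let nf := raw.foldl pvStepFilter ([], [])
  let sd := nf.2.foldl pvStepDedup (PySem.Set.empty, [])
  let decorated := (PySem.List.enumerate sd.2 0).map (fun p => (p.2, p.1))
  let sortedD := PySem.List.sorted2 decorated (fun p => PySem.Dict.getD pvRank p.1 1000) (fun p => p.2)
  (sortedD.map (fun p => p.1), nf.1)

-- ===== PORT B =====
-- body of B's single pass, state (notes, seen, dedup)
def pvStepB (st : List String × PySem.Set String × List String) (e : String) :
    List String × PySem.Set String × List String :=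
  let name := PySem.Str.strip e
  if name == "" then st
  else if pvExclude.contains name then (st.1 ++ [pvNote name], st.2.1, st.2.2)
  else if !(PySem.Set.contains st.2.1 name) then (st.1, PySem.Set.add st.2.1 name, st.2.2 ++ [name])
  else st

def normalize_and_sort_exploration_queue_py_alt (queue : List String) : List String × List String :=
  let st := queue.foldl pvStepB ([], PySem.Set.empty, [])
  -- order = sorted(_EXPLORATION_RANK, key=_EXPLORATION_RANK.get); every iterated name is a key of
  -- the dict, so .get(n) (Optional) is modelled exactly by getD n 0 on these names
  let order := PySem.List.sorted (PySem.Dict.keys pvRank) (fun n => PySem.Dict.getD pvRank n 0)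
  let ranked := order.filter (fun n => PySem.Set.contains st.2.1 n)
  let unranked := st.2.2.filter (fun n => !(PySem.Dict.contains pvRank n))
  (ranked ++ unranked, st.1)

-- ===== PRECONDITION & SPEC =====
def Spec_normalize_and_sort_exploration_queue_py (queue : List String) (out : List String × List String) : Prop := out = normalize_and_sort_exploration_queue_py_alt queue
instance (queue : List String) (out : List String × List String) : Decidable (Spec_normalize_and_sort_exploration_queue_py queue out) := by unfold Spec_normalize_and_sort_exploration_queue_py; infer_instance

-- ===== CLAIM (what is proved, stated in full; the proofs are below) =====
def Claim_equal_normalize_and_sort_exploration_queue_py : Prop := ∀ (queue : List String), Dom_normalize_and_sort_exploration_queue_py queue → Spec_normalize_and_sort_exploration_queue_py queue (normalize_and_sort_exploration_queue_py queue)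

-- ===== LEMMAS AND PROOFS =====

-- the rank table's keys, in ascending-rank order
def pvKeys : List String :=
  ["page_view", "view_promotion", "view_item_list", "select_item", "view_item",
   "add_to_wishlist", "add_to_cart", "view_cart", "remove_from_cart", "begin_checkout",
   "add_shipping_info", "add_payment_info"]

def pvRankOf (n : String) : Int := PySem.Dict.getD pvRank n 1000

theorem pv_keys_pvRank : PySem.Dict.keys pvRank = pvKeys := by decide

theorem pv_order_eval :
    PySem.List.sorted (PySem.Dict.keys pvRank) (fun n => PySem.Dict.getD pvRank n 0) = pvKeys := by
  rw [pv_keys_pvRank]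
  exact PySem.List.sorted_eq_self_of_pairwise _ _ (by decide)

theorem pv_rank_lt_of_mem : ∀ n ∈ pvKeys, pvRankOf n < 1000 := by decide

theorem pv_rank_pairwise : pvKeys.Pairwise (fun a b => pvRankOf a < pvRankOf b) := by decide

theorem pv_pvKeys_nodup : pvKeys.Nodup := by decide

theorem pv_contains_pvRank_iff (n : String) : PySem.Dict.contains pvRank n = true ↔ n ∈ pvKeys := by
  rw [PySem.Dict.contains_iff_mem_keys, pv_keys_pvRank]

theorem pv_rank_of_not_mem (n : String) (h : n ∉ pvKeys) : pvRankOf n = 1000 := by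
  apply PySem.Dict.getD_of_not_contains
  rw [← Bool.not_eq_true]
  intro hc
  exact h ((pv_contains_pvRank_iff n).mp hc)

-- closed form of A's exclude/notes loop
theorem pv_foldFilter (raw : List String) : ∀ ns f,
    raw.foldl pvStepFilter (ns, f) =
      (ns ++ (raw.filter (fun n => pvExclude.contains n)).map pvNote,
       f ++ raw.filter (fun n => !(pvExclude.contains n))) := by
  induction raw with
  | nil => intro ns f; simp
  | cons x t ih =>
      intro ns f
      by_cases h : x ∈ pvExclude
      · simp [pvStepFilter, List.filter_cons, h, ih, List.append_assoc]
      · simp [pvStepFilter, List.filter_cons, h, ih, List.append_assoc]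

-- A's dedup loop keeps seen = dedup (as lists) and computes a Set.update
theorem pv_foldDedup (f : List String) : ∀ (s : List String),
    f.foldl pvStepDedup (s, s) = (PySem.Set.update s f, PySem.Set.update s f) := by
  induction f with
  | nil => intro s; simp [PySem.Set.update]
  | cons n t ih =>
      intro s
      by_cases h : n ∈ s
      · have hstep : pvStepDedup (s, s) n = (s, s) := by simp [pvStepDedup, h]
        rw [List.foldl_cons, hstep, ih, PySem.Set.update_cons, PySem.Set.add_of_mem h]
      · have hstep : pvStepDedup (s, s) n = (s ++ [n], s ++ [n]) := by
          simp [pvStepDedup, h, PySem.Set.add_of_not_mem h]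
        rw [List.foldl_cons, hstep, ih, PySem.Set.update_cons, PySem.Set.add_of_not_mem h]

-- fusion: B's single pass = A's three passes
theorem pv_foldB (q : List String) : ∀ ns (s : PySem.Set String) d,
    q.foldl pvStepB (ns, s, d) =
      (ns ++ ((pvRawOf q).filter (fun n => pvExclude.contains n)).map pvNote,
       ((pvRawOf q).filter (fun n => !(pvExclude.contains n))).foldl pvStepDedup (s, d)) := by
  induction q with
  | nil => intro ns s d; simp [pvRawOf]
  | cons e t ih =>
      intro ns s d
      by_cases h0 : PySem.Str.strip e = ""
      · have hraw : pvRawOf (e :: t) = pvRawOf t := by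
          simp [pvRawOf, List.filter_cons, h0]
        have hstep : pvStepB (ns, s, d) e = (ns, s, d) := by
          simp [pvStepB, h0]
        rw [List.foldl_cons, hstep, ih, hraw]
      · have he : ¬(e = "") := by
          intro h; apply h0; rw [h]; decide
        have hraw : pvRawOf (e :: t) = PySem.Str.strip e :: pvRawOf t := by
          simp [pvRawOf, List.filter_cons, h0, he]
        rw [List.foldl_cons, hraw]
        by_cases h1 : PySem.Str.strip e ∈ pvExclude
        · have hstep : pvStepB (ns, s, d) e = (ns ++ [pvNote (PySem.Str.strip e)], s, d) := by
            simp [pvStepB, h0, h1]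
          rw [hstep, ih]
          simp [List.filter_cons, h1, List.append_assoc]
        · by_cases h2 : PySem.Str.strip e ∈ s
          · have hstep : pvStepB (ns, s, d) e = (ns, s, d) := by
              simp [pvStepB, h0, h1, h2]
            rw [hstep, ih]
            simp [List.filter_cons, h1, pvStepDedup, h2]
          · have hstep : pvStepB (ns, s, d) e =
                (ns, PySem.Set.add s (PySem.Str.strip e), d ++ [PySem.Str.strip e]) := by
              simp [pvStepB, h0, h1, h2]
            rw [hstep, ih]
            simp [List.filter_cons, h1, pvStepDedup, h2]

-- Python's tuple-key sort is the sort by the lexicographic key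
theorem pv_sorted2_as_sorted {α : Type} (xs : List α) (k1 k2 : α → Int) :
    PySem.List.sorted2 xs k1 k2 =
      PySem.List.sorted xs (fun a => toLex (k1 a, k2 a)) := by
  unfold PySem.List.sorted2 PySem.List.sorted
  have hb : (fun a b => decide (k1 a < k1 b) || (!decide (k1 b < k1 a) && decide (k2 a < k2 b)))
      = (fun a b => decide ((toLex (k1 a, k2 a) : Lex (Int × Int)) < toLex (k1 b, k2 b))) := by
    funext a b
    rw [Bool.eq_iff_iff]
    simp only [Bool.or_eq_true, Bool.and_eq_true, Bool.not_eq_true', decide_eq_true_eq,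
      decide_eq_false_iff_not, Prod.Lex.lt_iff, ofLex_toLex]
    constructor
    · rintro (h | ⟨h1, h2⟩)
      · exact Or.inl h
      · rcases lt_or_eq_of_le (not_lt.mp h1) with h | h
        · exact Or.inl h
        · exact Or.inr ⟨h, h2⟩
    · rintro (h | ⟨h1, h2⟩)
      · exact Or.inl h
      · exact Or.inr ⟨not_lt.mpr (le_of_eq h1), h2⟩
  simp only [if_neg (by decide : ¬(false = true))]
  rw [hb]

-- enumerate-then-swap over a duplicate-free list tags each name with its index
theorem pv_decorate_eq (L : List String) (hL : L.Nodup) :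
    (PySem.List.enumerate L 0).map (fun p => (p.2, p.1)) =
      L.map (fun n => (n, (L.idxOf n : Int))) := by
  apply List.ext_getElem
  · simp [PySem.List.length_enumerate]
  · intro i h1 h2
    have hi : i < L.length := by simpa [PySem.List.length_enumerate] using h2
    simp only [List.getElem_map, PySem.List.getElem_enumerate]
    rw [hL.idxOf_getElem]
    congr 1 <;> first | rfl | omega

theorem pv_pairwise_idxOf (L : List String) (hL : L.Nodup) :
    L.Pairwise (fun a b => (L.idxOf a : Int) < (L.idxOf b : Int)) := by
  rw [List.pairwise_iff_getElem]
  intro i j hi hj hij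
  rw [hL.idxOf_getElem, hL.idxOf_getElem]
  exact_mod_cast hij

-- the rank-bucketed list is exactly Python's stable sort by (rank, index)
theorem pv_bucket_eq (L : List String) (hL : L.Nodup) :
    (PySem.List.sorted2 ((PySem.List.enumerate L 0).map (fun p => (p.2, p.1)))
        (fun p => PySem.Dict.getD pvRank p.1 1000) (fun p => p.2)).map (fun p => p.1)
      = pvKeys.filter (fun n => PySem.Set.contains L n)
          ++ L.filter (fun n => !(PySem.Dict.contains pvRank n)) := by
  set names : List String :=
    pvKeys.filter (fun n => PySem.Set.contains L n)
      ++ L.filter (fun n => !(PySem.Dict.contains pvRank n)) with hnames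
  have hperm : names.Perm L := by
    have h2 : (L.filter (fun n => PySem.Dict.contains pvRank n)
        ++ L.filter (fun n => !(PySem.Dict.contains pvRank n))).Perm L :=
      List.filter_append_perm _ L
    have h1 : (pvKeys.filter (fun n => PySem.Set.contains L n)).Perm
        (L.filter (fun n => PySem.Dict.contains pvRank n)) := by
      rw [List.perm_ext_iff_of_nodup (pv_pvKeys_nodup.filter _) (hL.filter _)]
      intro n
      simp only [List.mem_filter]
      constructor
      · rintro ⟨hk, hc⟩
        exact ⟨(PySem.Set.contains_iff L n).mp hc, (pv_contains_pvRank_iff n).mpr hk⟩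
      · rintro ⟨hm, hc⟩
        exact ⟨(pv_contains_pvRank_iff n).mp hc, (PySem.Set.contains_iff L n).mpr hm⟩
    exact (h1.append_right _).trans h2
  rw [pv_sorted2_as_sorted, pv_decorate_eq L hL]
  rw [PySem.List.sorted_eq_of_perm_of_pairwise_lt _
        (names.map (fun n => (n, (L.idxOf n : Int)))) _ (hperm.map _)]
  · rw [List.map_map]
    have hid : ((fun p : String × Int => p.1) ∘ fun n => (n, (L.idxOf n : Int))) = id := rfl
    rw [hid, List.map_id]
  · rw [List.pairwise_map]
    have hkey : ∀ n : String,
        (fun p : String × Int => (toLex (PySem.Dict.getD pvRank p.1 1000, p.2) : Lex (Int × Int)))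
          ((fun n => (n, (L.idxOf n : Int))) n) = toLex (pvRankOf n, (L.idxOf n : Int)) := by
      intro n; rfl
    simp only [hkey]
    rw [hnames, List.pairwise_append]
    refine ⟨?_, ?_, ?_⟩
    · refine (pv_rank_pairwise.filter _).imp ?_
      intro a b hab
      rw [Prod.Lex.lt_iff]
      exact Or.inl hab
    · refine ((pv_pairwise_idxOf L hL).filter _).imp_of_mem ?_
      intro a b ha hb hab
      have hra : pvRankOf a = 1000 := by
        rcases List.mem_filter.mp ha with ⟨_, hc⟩
        exact pv_rank_of_not_mem a (fun hk => by
          simp [(pv_contains_pvRank_iff a).mpr hk] at hc)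
      have hrb : pvRankOf b = 1000 := by
        rcases List.mem_filter.mp hb with ⟨_, hc⟩
        exact pv_rank_of_not_mem b (fun hk => by
          simp [(pv_contains_pvRank_iff b).mpr hk] at hc)
      rw [Prod.Lex.lt_iff]
      simp only [ofLex_toLex]
      exact Or.inr ⟨by rw [hra, hrb], hab⟩
    · intro a ha b hb
      have hra : pvRankOf a < 1000 :=
        pv_rank_lt_of_mem a (List.mem_filter.mp ha).1
      have hrb : pvRankOf b = 1000 := by
        rcases List.mem_filter.mp hb with ⟨_, hc⟩
        exact pv_rank_of_not_mem b (fun hk => by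
          simp [(pv_contains_pvRank_iff b).mpr hk] at hc)
      rw [Prod.Lex.lt_iff]
      simp only [ofLex_toLex]
      exact Or.inl (by rw [hrb]; exact hra)

-- ===== VERDICT (by name: the statement is the Claim_ definition above) =====
theorem normalize_and_sort_exploration_queue_py_spec : Claim_equal_normalize_and_sort_exploration_queue_py := by
  intro queue _
  unfold Spec_normalize_and_sort_exploration_queue_py
  unfold normalize_and_sort_exploration_queue_py normalize_and_sort_exploration_queue_py_alt
  have hD : List.foldl pvStepDedup (PySem.Set.empty, ([] : List String))
      ((pvRawOf queue).filter (fun n => !(pvExclude.contains n)))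
      = (PySem.Set.ofList ((pvRawOf queue).filter (fun n => !(pvExclude.contains n))),
         PySem.Set.ofList ((pvRawOf queue).filter (fun n => !(pvExclude.contains n)))) := by
    rw [show (PySem.Set.empty, ([] : List String))
          = (([] : PySem.Set String), ([] : List String)) from rfl,
        pv_foldDedup, PySem.Set.update_nil_left]
  simp only [pv_foldB, pv_foldFilter, List.nil_append]
  simp only [hD, pv_order_eval]
  have hnodup : (PySem.Set.ofList
      ((pvRawOf queue).filter (fun n => !(pvExclude.contains n)))).Nodup :=
    PySem.Set.nodup_ofList _
  exact Prod.ext_iff.mpr ⟨pv_bucket_eq _ hnodup, rfl⟩
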